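-- pv_equiv track=rewrite | github.com/hhohha/WK_models | WK_src/lib/ctf_WK_grammar.py | compute_precedence_TM2
-- ===== SOURCE A (Python) =====
-- from typing import Dict, List, Tuple, Set, Union, Optional, TypeVar, Any, Callable, Generator
--
-- tLetter = TypeVar('tLetter')
--
-- tWord = List[tLetter]
--
-- def is_term(letter: tLetter) -> bool:
-- 	return isinstance(letter, tuple)
--
-- def compute_precedence_TM2(word: tWord, goal: str) -> int:
-- 	goalIdx, distance = 0, 0
--
-- 	for letter in word:
-- 		if is_term(letter):
-- 			for symbol in letter[0]:
-- 				if len(goal) > goalIdx and symbol == goal[goalIdx]: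
-- 					distance -= 1
-- 					goalIdx += 1
-- 				else:
-- 					distance += 1
-- 					goalIdx += 1
-- 	return distance
-- ===== SOURCE B (Python) =====
-- def compute_precedence_TM2(word, goal):
-- 	# Goal-driven: prefix-sum offsets of terminal chunks, then for each goal
-- 	# position binary-search the chunk containing it; symbols beyond the goal
-- 	# are never visited individually (only their total count matters).
-- 	chunks = [letter[0] for letter in word if isinstance(letter, tuple)]
-- 	offsets = []
-- 	total = 0
-- 	for c in chunks:
-- 		offsets.append(total)
-- 		total += len(c)
-- 	matches = 0
-- 	for g in range(min(len(goal), total)):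
-- 		lo, hi = 0, len(offsets)  # rightmost lo with offsets[lo] <= g
-- 		while hi - lo > 1:
-- 			mid = (lo + hi) // 2
-- 			if offsets[mid] <= g:
-- 				lo = mid
-- 			else:
-- 				hi = mid
-- 		if chunks[lo][g - offsets[lo]] == goal[g]:
-- 			matches += 1
-- 	return total - 2 * matches
-- ===== Notes on version B (the rewrite author's own statement) =====
-- stated objective: alternative
-- what changed: Instead of A's single signed-accumulator walk over every symbol, B precomputes prefix-sum offsets of the terminal chunks and then iterates over GOAL positions, binary-searching the chunk containing each position; symbols beyond the goal are never visited individually, only counted via the length sum, and the result is the closed form total - 2*matches.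
import Mathlib
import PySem

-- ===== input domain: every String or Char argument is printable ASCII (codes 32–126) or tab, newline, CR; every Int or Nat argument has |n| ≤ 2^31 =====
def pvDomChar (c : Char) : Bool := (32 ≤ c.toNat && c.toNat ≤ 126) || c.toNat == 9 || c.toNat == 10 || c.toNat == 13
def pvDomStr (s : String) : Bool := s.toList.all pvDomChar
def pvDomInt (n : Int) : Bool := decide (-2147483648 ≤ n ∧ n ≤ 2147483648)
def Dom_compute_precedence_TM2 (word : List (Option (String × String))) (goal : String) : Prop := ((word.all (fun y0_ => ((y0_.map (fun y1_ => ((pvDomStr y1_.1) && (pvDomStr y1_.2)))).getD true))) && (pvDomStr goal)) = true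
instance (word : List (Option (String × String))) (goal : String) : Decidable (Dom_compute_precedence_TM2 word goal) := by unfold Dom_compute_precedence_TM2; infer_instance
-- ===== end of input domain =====

-- B replaces A's symbol-by-symbol signed accumulator with a goal-driven algorithm:
-- prefix-sum offsets of the terminal chunks, a binary search per goal position to
-- find its chunk, and the closed form total - 2*matches (alternative decomposition).

-- ===== PORT A =====
-- one symbol step of A's inner loop: the running state is (goalIdx, distance)
def pvStepA (goal : String) (st : Int × Int) (symbol : Char) : Int × Int :=
  if PySem.Str.len goal > st.1 ∧ PySem.Str.pyGet? goal st.1 = some symbol then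
    (st.1 + 1, st.2 - 1)
  else
    (st.1 + 1, st.2 + 1)

def compute_precedence_TM2 (word : List (Option (String × String))) (goal : String) : Int :=
  (word.foldl (fun st letter =>
      match letter with
      | some t => t.1.toList.foldl (pvStepA goal) st   -- is_term(letter): the tuple case
      | none => st)
    ((0 : Int), (0 : Int))).2

-- ===== PORT B =====
-- the hand-written while loop of Source B: rightmost lo with offsets[lo] <= g
def pvBisect (offsets : List Nat) (g : Nat) (lo hi : Nat) : Nat :=
  if hi - lo > 1 then
    if offsets.getD ((lo + hi) / 2) 0 ≤ g then pvBisect offsets g ((lo + hi) / 2) hi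
    else pvBisect offsets g lo ((lo + hi) / 2)
  else lo
termination_by hi - lo
decreasing_by all_goals omega

def compute_precedence_TM2_alt (word : List (Option (String × String))) (goal : String) : Int :=
  let chunks : List (List Char) := word.filterMap (fun letter => letter.map (fun t => t.1.toList))
  let ot := chunks.foldl (fun (st : List Nat × Nat) c => (st.1 ++ [st.2], st.2 + c.length)) ([], 0)
  let offsets := ot.1
  let total := ot.2
  let nMatch := (List.range (min goal.toList.length total)).foldl (fun m g =>
      let lo := pvBisect offsets g 0 offsets.length
      if (chunks.getD lo []).getD (g - offsets.getD lo 0) ' ' == goal.toList.getD g ' '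
      then m + 1 else m) (0 : Nat)
  (total : Int) - 2 * (nMatch : Int)

-- ===== PRECONDITION & SPEC =====
def Spec_compute_precedence_TM2 (word : List (Option (String × String))) (goal : String) (out : Int) : Prop := out = compute_precedence_TM2_alt word goal
instance (word : List (Option (String × String))) (goal : String) (out : Int) : Decidable (Spec_compute_precedence_TM2 word goal out) := by unfold Spec_compute_precedence_TM2; infer_instance

-- ===== CLAIM (what is proved, stated in full; the proofs are below) =====
def Claim_equal_compute_precedence_TM2 : Prop := ∀ (word : List (Option (String × String))) (goal : String), Dom_compute_precedence_TM2 word goal → Spec_compute_precedence_TM2 word goal (compute_precedence_TM2 word goal)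

-- ===== LEMMAS AND PROOFS =====

-- A's nested loops equal one fold over the flattened symbol list
lemma pv_foldl_flat (goal : String) (word : List (Option (String × String))) (st : Int × Int) :
    word.foldl (fun st letter =>
      match letter with
      | some t => t.1.toList.foldl (pvStepA goal) st
      | none => st) st
    = (word.flatMap (fun letter =>
        match letter with
        | some t => t.1.toList
        | none => [])).foldl (pvStepA goal) st := by
  induction word generalizing st with
  | nil => rfl
  | cons l ls ih =>
    cases l <;> simp [List.flatMap_cons, List.foldl_append, ih]

-- the inner fold in closed form: index advances by cs.length, distance by len - 2*matches
lemma pv_inner (goal : String) (cs : List Char) :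
    ∀ (n : Nat) (d : Int),
      cs.foldl (pvStepA goal) ((n : Int), d)
        = ((n : Int) + cs.length,
           d + cs.length
             - 2 * (((cs.zip (goal.toList.drop n)).filter (fun sg => sg.1 == sg.2)).length : Int)) := by
  induction cs with
  | nil => intro n d; simp
  | cons c cs ih =>
    intro n d
    rw [List.foldl_cons]
    have hcast : ((n : Int) + 1) = (((n + 1 : Nat)) : Int) := by push_cast; ring
    by_cases hn : n < goal.toList.length
    · have hg : PySem.Str.pyGet? goal ((n : Nat) : Int) = some goal.toList[n] := by
        simp [PySem.List.pyGet?_natCast, List.getElem?_eq_getElem hn]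
      have hn' : n < goal.length := by simpa using hn
      have hdrop : goal.toList.drop n = goal.toList[n] :: goal.toList.drop (n + 1) :=
        (List.getElem_cons_drop hn).symm
      rw [hdrop, List.zip_cons_cons, List.filter_cons]
      by_cases hc : c = goal.toList[n]
      · have hstep : pvStepA goal ((n : Int), d) c = ((n : Int) + 1, d - 1) := by
          simp [pvStepA, hc, hn']
          intro h
          exact absurd rfl h
        rw [hstep, hcast, ih (n + 1) (d - 1)]
        have hcond : ((fun sg => sg.1 == sg.2) (c, goal.toList[n]) : Bool) = true := by
          simp [hc]
        rw [if_pos hcond]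
        simp only [List.length_cons, Prod.mk.injEq]
        constructor <;> push_cast <;> ring
      · have hstep : pvStepA goal ((n : Int), d) c = ((n : Int) + 1, d + 1) := by
          simp only [pvStepA]
          rw [if_neg]
          rintro ⟨-, h2⟩
          rw [hg] at h2
          exact hc (Option.some.injEq _ _ ▸ h2).symm
        rw [hstep, hcast, ih (n + 1) (d + 1)]
        have hcond : ((fun sg => sg.1 == sg.2) (c, goal.toList[n]) : Bool) = false := by
          simp [hc]
        rw [if_neg (by simp [hcond])]
        simp only [List.length_cons, Prod.mk.injEq]
        constructor <;> push_cast <;> ring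
    · have hdrop : goal.toList.drop n = [] := List.drop_eq_nil_of_le (by omega)
      have hdrop' : goal.toList.drop (n + 1) = [] := List.drop_eq_nil_of_le (by omega)
      have hstep : pvStepA goal ((n : Int), d) c = ((n : Int) + 1, d + 1) := by
        simp only [pvStepA]
        rw [if_neg]
        rintro ⟨h1, -⟩
        have hn' : ¬ n < goal.length := by simpa using hn
        simp at h1
        omega
      rw [hstep, hcast, ih (n + 1) (d + 1), hdrop, hdrop']
      simp only [List.zip_nil_right, List.filter_nil, List.length_nil, List.length_cons,
        Prod.mk.injEq]
      constructor <;> push_cast <;> ring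

-- A's flatMap over letters is the flatten of B's chunk list
lemma pv_flatMap_eq (word : List (Option (String × String))) :
    word.flatMap (fun letter =>
      match letter with
      | some t => t.1.toList
      | none => [])
    = (word.filterMap (fun letter => letter.map (fun t => t.1.toList))).flatten := by
  induction word with
  | nil => rfl
  | cons l ls ih => cases l <;> simp [ih]

-- proof-only spec of the offsets the fold of B builds
def pvOffs (b : Nat) : List (List Char) → List Nat
  | [] => []
  | c :: cs => b :: pvOffs (b + c.length) cs

lemma pv_fold_off (cs : List (List Char)) : ∀ (acc : List Nat) (b : Nat),
    cs.foldl (fun (st : List Nat × Nat) c => (st.1 ++ [st.2], st.2 + c.length)) (acc, b)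
      = (acc ++ pvOffs b cs, b + (cs.map List.length).sum) := by
  induction cs with
  | nil => intro acc b; simp [pvOffs]
  | cons c cs ih =>
    intro acc b
    rw [List.foldl_cons, ih]
    simp [pvOffs, Nat.add_assoc]

lemma pvOffs_length (cs : List (List Char)) : ∀ b, (pvOffs b cs).length = cs.length := by
  induction cs with
  | nil => intro b; rfl
  | cons c cs ih => intro b; simp [pvOffs, ih]

def pvOffAt (cs : List (List Char)) (j : Nat) : Nat := ((cs.take j).map List.length).sum

lemma pvOffs_getD (cs : List (List Char)) : ∀ (b j : Nat), j < cs.length →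
    (pvOffs b cs).getD j 0 = b + pvOffAt cs j := by
  induction cs with
  | nil => intro b j h; simp at h
  | cons c cs ih =>
    intro b j h
    cases j with
    | zero => simp [pvOffs, pvOffAt]
    | succ j =>
      have h' : j < cs.length := by simpa using h
      rw [pvOffs, List.getD_cons_succ, ih (b + c.length) j h']
      simp [pvOffAt, List.take_succ_cons]
      omega

lemma pvOffAt_succ (cs : List (List Char)) : ∀ j, j < cs.length →
    pvOffAt cs (j + 1) = pvOffAt cs j + (cs.getD j []).length := by
  induction cs with
  | nil => intro j h; simp at h
  | cons c cs ih =>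
    intro j h
    cases j with
    | zero => simp [pvOffAt]
    | succ j =>
      have := ih j (by simpa using h)
      simp [pvOffAt] at this ⊢
      omega

lemma pvOffAt_len (cs : List (List Char)) : pvOffAt cs cs.length = (cs.map List.length).sum := by
  simp [pvOffAt]

-- indexing the flatten via the chunk located by the sandwich
lemma pv_flat_get (cs : List (List Char)) : ∀ (j g : Nat) (d : Char), j < cs.length →
    pvOffAt cs j ≤ g → g < pvOffAt cs j + (cs.getD j []).length →
    cs.flatten.getD g d = (cs.getD j []).getD (g - pvOffAt cs j) d := by
  induction cs with
  | nil => intro j g d h; simp at h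
  | cons c cs ih =>
    intro j g d hj hlo hhi
    cases j with
    | zero =>
      simp only [pvOffAt, List.take_zero, List.map_nil, List.sum_nil, Nat.zero_add,
        List.getD_cons_zero] at hlo hhi ⊢
      rw [List.flatten_cons, List.getD_append _ _ _ _ (by omega), Nat.sub_zero]
    | succ j =>
      have hoff : pvOffAt (c :: cs) (j + 1) = c.length + pvOffAt cs j := by
        simp [pvOffAt]
      rw [hoff] at hlo hhi
      have hj' : j < cs.length := by simpa using hj
      have hge : c.length ≤ g := by omega
      rw [List.flatten_cons, List.getD_append_right _ _ _ _ hge,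
        ih j (g - c.length) d hj' (by omega) (by simp at hhi ⊢; omega)]
      have : g - pvOffAt (c :: cs) (j + 1) = g - c.length - pvOffAt cs j := by
        rw [hoff]; omega
      rw [this]
      simp

-- the while loop finds the rightmost j with offsets[j] <= g (no sortedness needed)
lemma pvBisect_spec : ∀ (n : Nat) (offsets : List Nat) (g lo hi : Nat), hi - lo ≤ n → lo < hi →
    hi ≤ offsets.length → offsets.getD lo 0 ≤ g →
    (hi = offsets.length ∨ g < offsets.getD hi 0) →
    lo ≤ pvBisect offsets g lo hi ∧ pvBisect offsets g lo hi < hi ∧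
    offsets.getD (pvBisect offsets g lo hi) 0 ≤ g ∧
    (pvBisect offsets g lo hi + 1 = offsets.length ∨ g < offsets.getD (pvBisect offsets g lo hi + 1) 0) := by
  intro n
  induction n with
  | zero => intro offsets g lo hi h1 h2; omega
  | succ n ih =>
    intro offsets g lo hi h1 h2 hlen hlo hhi
    rw [pvBisect]
    by_cases hbig : hi - lo > 1
    · rw [if_pos hbig]
      by_cases hmid : offsets.getD ((lo + hi) / 2) 0 ≤ g
      · rw [if_pos hmid]
        have h := ih offsets g ((lo + hi) / 2) hi (by omega) (by omega) hlen hmid hhi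
        exact ⟨by omega, h.2.1, h.2.2.1, h.2.2.2⟩
      · rw [if_neg hmid]
        have h := ih offsets g lo ((lo + hi) / 2) (by omega) (by omega) (by omega) hlo
          (Or.inr (by omega))
        exact ⟨h.1, by omega, h.2.2.1, h.2.2.2⟩
    · rw [if_neg hbig]
      have : hi = lo + 1 := by omega
      subst this
      exact ⟨Nat.le_refl _, by omega, hlo, hhi⟩

-- the full chunk lookup of Source B fetches exactly the g-th flattened symbol
lemma pv_lookup (cs : List (List Char)) (g : Nat) (d : Char)
    (hg : g < (cs.map List.length).sum) :
    (cs.getD (pvBisect (pvOffs 0 cs) g 0 (pvOffs 0 cs).length) []).getD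
      (g - (pvOffs 0 cs).getD (pvBisect (pvOffs 0 cs) g 0 (pvOffs 0 cs).length) 0) d
    = cs.flatten.getD g d := by
  have hne : 0 < cs.length := by
    cases cs with
    | nil => simp at hg
    | cons c cs => simp
  have hlen : (pvOffs 0 cs).length = cs.length := pvOffs_length cs 0
  have h0 : (pvOffs 0 cs).getD 0 0 ≤ g := by
    rw [pvOffs_getD cs 0 0 hne]
    simp [pvOffAt]
  obtain ⟨hj0, hjlt, hjle, hjhi⟩ := pvBisect_spec (pvOffs 0 cs).length (pvOffs 0 cs) g 0
    (pvOffs 0 cs).length (by omega) (by omega) (le_refl _) h0 (Or.inl rfl)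
  set j := pvBisect (pvOffs 0 cs) g 0 (pvOffs 0 cs).length with hj
  have hjlt' : j < cs.length := by omega
  have hgetj : (pvOffs 0 cs).getD j 0 = pvOffAt cs j := by
    rw [pvOffs_getD cs 0 j hjlt']; omega
  have hupper : g < pvOffAt cs j + (cs.getD j []).length := by
    rw [← pvOffAt_succ cs j hjlt']
    rcases hjhi with h | h
    · rw [hlen] at h
      rw [h, pvOffAt_len]; exact hg
    · have hj1 : j + 1 < cs.length ∨ j + 1 = cs.length := by omega
      rcases hj1 with h1 | h1
      · rw [pvOffs_getD cs 0 (j+1) h1] at h; omega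
      · rw [h1, pvOffAt_len]; exact hg
  rw [hgetj, pv_flat_get cs j g d hjlt' (by rw [hgetj] at hjle; exact hjle) hupper]

-- the counting fold of Source B is a countP
lemma pv_foldl_count (l : List Nat) (p : Nat → Bool) : ∀ (n : Nat),
    l.foldl (fun m g => if p g then m + 1 else m) n = n + l.countP p := by
  induction l with
  | nil => intro n; simp
  | cons a l ih =>
    intro n
    rw [List.foldl_cons, List.countP_cons]
    by_cases h : p a <;> simp [h, ih] <;> omega

-- zip-filter match count as a countP over positions
lemma pv_zip_count (s : List Char) : ∀ (t : List Char),
    ((s.zip t).filter (fun sg => sg.1 == sg.2)).length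
      = (List.range (min s.length t.length)).countP (fun g => s.getD g ' ' == t.getD g ' ') := by
  induction s with
  | nil => intro t; simp
  | cons a s ih =>
    intro t
    cases t with
    | nil => simp
    | cons b t =>
      have hmin : min (a :: s).length (b :: t).length = min s.length t.length + 1 := by
        simp [Nat.succ_min_succ]
      rw [hmin, List.range_succ_eq_map, List.countP_cons, List.countP_map,
        List.zip_cons_cons, List.filter_cons]
      have hcomp : List.countP ((fun g => (a :: s).getD g ' ' == (b :: t).getD g ' ') ∘ Nat.succ)
          (List.range (min s.length t.length))
          = List.countP (fun g => s.getD g ' ' == t.getD g ' ')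
            (List.range (min s.length t.length)) := by
        apply List.countP_congr
        intro g _
        simp
      rw [hcomp, ← ih t]
      by_cases h : a = b <;> simp [h]

-- ===== VERDICT (by name: the statement is the Claim_ definition above) =====
theorem compute_precedence_TM2_spec : Claim_equal_compute_precedence_TM2 := by
  intro word goal _
  unfold Spec_compute_precedence_TM2 compute_precedence_TM2 compute_precedence_TM2_alt
  rw [pv_foldl_flat]
  have hA := pv_inner goal (word.flatMap (fun letter =>
    match letter with
    | some t => t.1.toList
    | none => [])) 0 0
  simp only [Nat.cast_zero, List.drop_zero] at hA
  rw [hA, pv_flatMap_eq]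
  set chunks : List (List Char) := word.filterMap (fun letter => letter.map (fun t => t.1.toList)) with hch
  have hfold := pv_fold_off chunks [] 0
  simp only [List.nil_append, Nat.zero_add] at hfold
  have h1 : (chunks.foldl (fun (st : List Nat × Nat) c => (st.1 ++ [st.2], st.2 + c.length)) ([], 0)).1
      = pvOffs 0 chunks := by rw [hfold]
  have h2 : (chunks.foldl (fun (st : List Nat × Nat) c => (st.1 ++ [st.2], st.2 + c.length)) ([], 0)).2
      = (chunks.map List.length).sum := by rw [hfold]
  show _ =
    (((chunks.foldl (fun (st : List Nat × Nat) c => (st.1 ++ [st.2], st.2 + c.length)) ([], 0)).2 : Int)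
      - 2 * (((List.range (min goal.toList.length
            (chunks.foldl (fun (st : List Nat × Nat) c => (st.1 ++ [st.2], st.2 + c.length)) ([], 0)).2)).foldl
          (fun m g =>
            if (chunks.getD (pvBisect (chunks.foldl (fun (st : List Nat × Nat) c => (st.1 ++ [st.2], st.2 + c.length)) ([], 0)).1 g 0 (chunks.foldl (fun (st : List Nat × Nat) c => (st.1 ++ [st.2], st.2 + c.length)) ([], 0)).1.length) []).getD
                (g - (chunks.foldl (fun (st : List Nat × Nat) c => (st.1 ++ [st.2], st.2 + c.length)) ([], 0)).1.getD (pvBisect (chunks.foldl (fun (st : List Nat × Nat) c => (st.1 ++ [st.2], st.2 + c.length)) ([], 0)).1 g 0 (chunks.foldl (fun (st : List Nat × Nat) c => (st.1 ++ [st.2], st.2 + c.length)) ([], 0)).1.length) 0) ' '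
               == goal.toList.getD g ' '
            then m + 1 else m) (0 : Nat) : Nat) : Int))
  rw [h1, h2]
  rw [pv_foldl_count, Nat.zero_add]
  have hc : (List.range (min goal.toList.length (chunks.map List.length).sum)).countP
        (fun g => (chunks.getD (pvBisect (pvOffs 0 chunks) g 0 (pvOffs 0 chunks).length) []).getD
          (g - (pvOffs 0 chunks).getD (pvBisect (pvOffs 0 chunks) g 0 (pvOffs 0 chunks).length) 0) ' '
          == goal.toList.getD g ' ')
      = (List.range (min goal.toList.length (chunks.map List.length).sum)).countP
        (fun g => chunks.flatten.getD g ' ' == goal.toList.getD g ' ') := by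
    apply List.countP_congr
    intro g hgmem
    have hgr := List.mem_range.mp hgmem
    have hg : g < (chunks.map List.length).sum := by omega
    rw [pv_lookup chunks g ' ' hg]
  rw [hc]
  have hflat : (chunks.map List.length).sum = chunks.flatten.length := by simp
  rw [hflat, Nat.min_comm, ← pv_zip_count chunks.flatten goal.toList]
  push_cast
  ring
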